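-- pv_equiv track=rewrite | github.com/PyramidAGI/gyrator | nlcheck_match.py | find_matches
-- ===== SOURCE A (Python) =====
-- QUESTION_OUTPUT = "e0=question"
--
-- def find_matches(sentence: str, rules: list[tuple[str, str]]) -> list[str]:
--     matches = []
--     normalized = sentence
--
--     if "?" in normalized:
--         matches.append(QUESTION_OUTPUT)
--         normalized = normalized.replace("?", " ")
--
--     lowered = normalized.lower()
--     matches.extend(output for pattern, output in rules if pattern in lowered)
--     return matches
-- ===== SOURCE B (Python) =====
-- QUESTION_OUTPUT = "e0=question"
--
-- def find_matches(sentence: str, rules: list[tuple[str, str]]) -> list[str]: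
--     has_q = "?" in sentence
--     lowered = (sentence.replace("?", " ") if has_q else sentence).lower()
--     n = len(lowered)
--     plens = {len(pattern) for pattern, _ in rules}
--     subs = {lowered[i:i + m] for m in plens for i in range(n - m + 1)}
--     head = [QUESTION_OUTPUT] if has_q else []
--     return head + [output for pattern, output in rules if pattern in subs]
-- ===== Notes on version B (the rewrite author's own statement) =====
-- stated objective: alternative
-- what changed: B replaces A's per-rule substring scan of the sentence with a hash-set index of the sentence's substrings built once (only at the pattern lengths that occur), then answers each rule by a single set lookup.
import Mathlib
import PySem

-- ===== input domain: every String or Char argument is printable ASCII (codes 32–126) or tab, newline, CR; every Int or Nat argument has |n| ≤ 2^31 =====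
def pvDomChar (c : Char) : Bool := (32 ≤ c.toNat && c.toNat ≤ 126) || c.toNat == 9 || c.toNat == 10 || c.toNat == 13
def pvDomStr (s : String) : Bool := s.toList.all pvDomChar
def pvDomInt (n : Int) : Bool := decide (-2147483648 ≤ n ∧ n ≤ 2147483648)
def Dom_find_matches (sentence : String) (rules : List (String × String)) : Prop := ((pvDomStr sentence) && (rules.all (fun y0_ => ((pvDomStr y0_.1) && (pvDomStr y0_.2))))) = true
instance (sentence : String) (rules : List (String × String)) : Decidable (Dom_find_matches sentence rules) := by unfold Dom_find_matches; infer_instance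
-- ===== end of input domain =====

-- B replaces the per-rule substring scan of the sentence by a precomputed hash-set index of
-- the sentence's substrings (only at the pattern lengths that occur), one O(1) lookup per rule.

-- ===== PORT A =====
def find_matches (sentence : String) (rules : List (String × String)) : List String :=
  let acc : List String := []
  let normalized : String := sentence
  let st : List String × String :=
    if PySem.Str.isIn "?" normalized then
      (acc ++ ["e0=question"], PySem.Str.replace normalized "?" " ")
    else (acc, normalized)
  let lowered := PySem.Str.lower st.2
  st.1 ++ rules.filterMap (fun pr => if PySem.Str.isIn pr.1 lowered then some pr.2 else none)

-- ===== PORT B =====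
def find_matches_alt (sentence : String) (rules : List (String × String)) : List String :=
  let hasQ := PySem.Str.isIn "?" sentence
  let lowered := PySem.Str.lower (if hasQ then PySem.Str.replace sentence "?" " " else sentence)
  let n := PySem.Str.len lowered
  let plens : PySem.Set Int := PySem.Set.ofList (rules.map (fun pr => PySem.Str.len pr.1))
  let subs : PySem.Set String := PySem.Set.ofList
    (plens.flatMap (fun m => (PySem.List.pyRange 0 (n - m + 1) 1).map
        (fun i => PySem.Str.slice lowered (some i) (some (i + m)))))
  let head : List String := if hasQ then ["e0=question"] else []
  head ++ rules.filterMap (fun pr => if PySem.Set.contains subs pr.1 then some pr.2 else none)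

-- ===== PRECONDITION & SPEC =====
def Spec_find_matches (sentence : String) (rules : List (String × String)) (out : List String) : Prop := out = find_matches_alt sentence rules
instance (sentence : String) (rules : List (String × String)) (out : List String) : Decidable (Spec_find_matches sentence rules out) := by unfold Spec_find_matches; infer_instance

-- ===== CLAIM (what is proved, stated in full; the proofs are below) =====
def Claim_equal_find_matches : Prop := ∀ (sentence : String) (rules : List (String × String)), Dom_find_matches sentence rules → Spec_find_matches sentence rules (find_matches sentence rules)

-- ===== LEMMAS AND PROOFS =====

-- membership in B's substring index, for a pattern whose length occurs in ms, is exactly Python's `pattern in lowered`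
theorem pv_contains_subs_eq_isIn (L : String) (ms : List Int) (p : String)
    (hms : ∀ m ∈ ms, 0 ≤ m)
    (hp : (PySem.Str.len p) ∈ ms) :
    PySem.Set.contains (PySem.Set.ofList (
      (PySem.Set.ofList ms).flatMap (fun m =>
        (PySem.List.pyRange 0 (PySem.Str.len L - m + 1) 1).map
          (fun i => PySem.Str.slice L (some i) (some (i + m)))))) p
      = PySem.Str.isIn p L := by
  rw [Bool.eq_iff_iff, PySem.Set.contains_iff, PySem.Set.mem_ofList,
      PySem.Str.isIn_iff_infix, List.mem_flatMap]
  constructor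
  · rintro ⟨m, hm, hmem⟩
    rw [List.mem_map] at hmem
    obtain ⟨i, hi, hslice⟩ := hmem
    rw [PySem.List.mem_pyRange_one] at hi
    have hm' : 0 ≤ m := hms m ((PySem.Set.mem_ofList ms m).mp hm)
    have h0i : 0 ≤ i := hi.1
    have h0im : 0 ≤ i + m := by omega
    have : p.toList = List.take ((i + m).toNat - i.toNat) (List.drop i.toNat L.toList) := by
      rw [← hslice, PySem.Str.toList_slice]
      exact PySem.List.slice_toNat _ h0i h0im
    rw [this]
    exact (List.take_prefix _ _).isInfix.trans (List.drop_suffix _ _).isInfix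
  · intro hinf
    obtain ⟨s, t, hst⟩ := hinf
    refine ⟨PySem.Str.len p, (PySem.Set.mem_ofList ms _).mpr hp, ?_⟩
    rw [List.mem_map]
    refine ⟨(s.length : Int), ?_, ?_⟩
    · rw [PySem.List.mem_pyRange_one]
      have hlen : s.length + (p.toList.length + t.length) = L.toList.length := by
        simpa using congrArg List.length hst
      rw [PySem.Str.len_eq, PySem.Str.len_eq]
      constructor
      · positivity
      · omega
    · apply String.toList_injective
      rw [PySem.Str.toList_slice]
      have hnum : (s.length : Int) + PySem.Str.len p
          = ((s.length : Int)) + ((p.toList.length : Int)) := by rw [PySem.Str.len_eq]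
      rw [hnum]
      show PySem.List.slice L.toList (some (s.length : Int))
          (some ((s.length : Int) + (p.toList.length : Int))) = p.toList
      rw [PySem.List.slice_natCast_add, ← hst]
      rw [List.append_assoc, List.drop_left, List.take_left]

theorem pv_filterMap_eq (L : String) (rules : List (String × String)) :
    rules.filterMap (fun pr => if PySem.Set.contains (PySem.Set.ofList (
      (PySem.Set.ofList (rules.map (fun pr => PySem.Str.len pr.1))).flatMap (fun m =>
        (PySem.List.pyRange 0 (PySem.Str.len L - m + 1) 1).map
          (fun i => PySem.Str.slice L (some i) (some (i + m)))))) pr.1 then some pr.2 else none)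
    = rules.filterMap (fun pr => if PySem.Str.isIn pr.1 L then some pr.2 else none) := by
  apply List.filterMap_congr
  intro pr hpr
  rw [pv_contains_subs_eq_isIn]
  · intro m hm
    rw [List.mem_map] at hm
    obtain ⟨q, _, hql⟩ := hm
    rw [← hql, PySem.Str.len_eq]; positivity
  · exact List.mem_map.mpr ⟨pr, hpr, rfl⟩

-- ===== VERDICT (by name: the statement is the Claim_ definition above) =====
theorem find_matches_spec : Claim_equal_find_matches := by
  intro sentence rules _
  show find_matches sentence rules = find_matches_alt sentence rules
  unfold find_matches find_matches_alt
  by_cases hq : PySem.Str.isIn "?" sentence = true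
  · simp only [hq, if_true, List.nil_append]
    rw [pv_filterMap_eq]
  · rw [Bool.not_eq_true] at hq
    simp only [hq, Bool.false_eq_true, if_false, List.nil_append]
    rw [pv_filterMap_eq]
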